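-- pv_equiv track=rewrite | github.com/vaibhav-jain-dev/learning-algo | problems/200-must-solve/graphs/07-single-cycle-check/similar/03-circular-array-loop/python_code.py | circular_array_loop_v2
-- ===== SOURCE A (Python) =====
-- from typing import List
--
-- def circular_array_loop_v2(nums: List[int]) -> bool:
--     """
--     Alternative implementation with clearer logic.
--
--     Args:
--         nums: Array of non-zero integers
--
--     Returns:
--         True if valid cycle exists
--     """
--     n = len(nums)
--     nums = nums.copy()  # Don't modify original
--
--     def next_idx(idx: int) -> int:
--         return (idx + nums[idx]) % n
--
--     for i in range(n):
--         if nums[i] == 0: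
--             continue
--
--         is_forward = nums[i] > 0
--         slow, fast = i, i
--
--         while True:
--             # Move slow one step
--             next_slow = next_idx(slow)
--             if nums[next_slow] == 0 or (nums[next_slow] > 0) != is_forward:
--                 break
--
--             # Move fast two steps
--             next_fast = next_idx(fast)
--             if nums[next_fast] == 0 or (nums[next_fast] > 0) != is_forward:
--                 break
--
--             fast = next_fast
--             next_fast = next_idx(fast)
--             if nums[next_fast] == 0 or (nums[next_fast] > 0) != is_forward:
--                 break
--
--             slow = next_slow
--             fast = next_fast
--
--             if slow == fast:
--                 # Verify cycle length > 1
--                 if next_idx(slow) != slow: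
--                     return True
--                 break
--
--         # Mark path as invalid
--         j = i
--         while nums[j] != 0 and (nums[j] > 0) == is_forward:
--             next_j = next_idx(j)
--             nums[j] = 0
--             j = next_j
--
--     return False
-- ===== SOURCE B (Python) =====
-- from typing import List
--
-- def circular_array_loop_v2(nums: List[int]) -> bool:
--     # Single-pointer bounded walk: follow the consistent-direction path for at
--     # most n+1 steps, recording it; surviving n+1 steps means we are inside a
--     # cycle, valid iff it is not a self-loop.  Zero out the walked path before
--     # trying the next start.
--     n = len(nums)
--     vals = list(nums)
--     for i in range(n):
--         if vals[i] == 0: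
--             continue
--         forward = vals[i] > 0
--         path = []
--         cur = i
--         found = False
--         while vals[cur] != 0 and (vals[cur] > 0) == forward:
--             nxt = (cur + vals[cur]) % n
--             path.append(cur)
--             if len(path) == n + 1:
--                 found = nxt != cur
--                 break
--             cur = nxt
--         if found:
--             return True
--         for j in path:
--             vals[j] = 0
--     return False
-- ===== Notes on version B (the rewrite author's own statement) =====
-- stated objective: simpler
-- what changed: A's two-pointer Floyd slow/fast cycle detection per start is replaced by a single-pointer walk that records its path and declares a cycle exactly when it survives n+1 consistent-direction steps (valid iff the final step is not a self-loop), zeroing the recorded path afterwards.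
import Mathlib
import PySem

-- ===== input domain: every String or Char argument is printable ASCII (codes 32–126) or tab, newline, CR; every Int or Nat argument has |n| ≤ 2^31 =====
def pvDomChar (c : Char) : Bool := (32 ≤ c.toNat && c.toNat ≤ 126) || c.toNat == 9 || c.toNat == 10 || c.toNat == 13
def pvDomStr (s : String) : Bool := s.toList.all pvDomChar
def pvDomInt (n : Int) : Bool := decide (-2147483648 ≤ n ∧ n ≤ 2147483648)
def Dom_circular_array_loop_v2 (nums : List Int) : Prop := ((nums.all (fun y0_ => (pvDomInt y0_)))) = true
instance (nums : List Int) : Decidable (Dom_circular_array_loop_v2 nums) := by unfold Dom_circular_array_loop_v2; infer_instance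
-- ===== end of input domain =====

-- B replaces A's two-pointer Floyd cycle detection by a single bounded walk that
-- records its path (surviving n+1 consistent steps proves a cycle); objective: simpler.


-- ===== PORT A =====
-- helper next_idx: (idx + nums[idx]) % n; idx is always a mod-n result in [0,n),
-- so pyGetD with default 0 is exact here.
def pvA_next (v : List Int) (n : Int) (idx : Int) : Int :=
  PySem.Int.mod (idx + PySem.List.pyGetD v idx 0) n

-- the inner `while True` Floyd loop: `true` = `return True`, `false` = `break`.
-- Python has no fuel; the caller passes fuel v.length+1, proven sufficient below
-- (the fuel-0 branch is never reached).
def pvA_floyd (v : List Int) (n : Int) (fwd : Bool) : Nat → Int → Int → Bool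
  | 0, _, _ => false
  | fuel+1, slow, fast =>
    let next_slow := pvA_next v n slow
    if PySem.List.pyGetD v next_slow 0 = 0 ∨ decide (0 < PySem.List.pyGetD v next_slow 0) ≠ fwd then
      false
    else
      let next_fast := pvA_next v n fast
      if PySem.List.pyGetD v next_fast 0 = 0 ∨ decide (0 < PySem.List.pyGetD v next_fast 0) ≠ fwd then
        false
      else
        let fast1 := next_fast
        let next_fast2 := pvA_next v n fast1
        if PySem.List.pyGetD v next_fast2 0 = 0 ∨ decide (0 < PySem.List.pyGetD v next_fast2 0) ≠ fwd then
          false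
        else
          let slow1 := next_slow
          let fast2 := next_fast2
          if slow1 = fast2 then
            if pvA_next v n slow1 ≠ slow1 then true else false
          else
            pvA_floyd v n fwd fuel slow1 fast2

-- the `while nums[j] != 0 and ...` invalidation loop; `nums[j] = 0` is List.set
-- (j is always a mod-n result in [0,n)).  Fuel v.length+1 is proven sufficient.
def pvA_zero (n : Int) (fwd : Bool) : Nat → List Int → Int → List Int
  | 0, v, _ => v
  | fuel+1, v, j =>
    if PySem.List.pyGetD v j 0 ≠ 0 ∧ decide (0 < PySem.List.pyGetD v j 0) = fwd then
      pvA_zero n fwd fuel (v.set j.toNat 0) (pvA_next v n j)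
    else v

-- `for i in range(n): ...` with the mutating copy of nums as state
def pvA_outer (n : Int) : List Int → List Int → Bool
  | [], _ => false
  | i :: rest, v =>
    if PySem.List.pyGetD v i 0 = 0 then pvA_outer n rest v
    else
      if pvA_floyd v n (decide (0 < PySem.List.pyGetD v i 0)) (v.length + 1) i i then true
      else pvA_outer n rest (pvA_zero n (decide (0 < PySem.List.pyGetD v i 0)) (v.length + 1) v i)

def circular_array_loop_v2 (nums : List Int) : Bool :=
  pvA_outer (nums.length : Int) (PySem.List.pyRange 0 (nums.length : Int) 1) nums

-- ===== PORT B =====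
-- B's `while vals[cur] != 0 and ...` walk, recording the path; it stops by itself
-- once len(path) = n+1, so fuel v.length+1 is exact (the fuel-0 branch is dead).
def pvB_walk (v : List Int) (n : Int) (fwd : Bool) : Nat → Int → List Int → Bool × List Int
  | 0, _, path => (false, path)
  | fuel+1, cur, path =>
    if PySem.List.pyGetD v cur 0 ≠ 0 ∧ decide (0 < PySem.List.pyGetD v cur 0) = fwd then
      let nxt := PySem.Int.mod (cur + PySem.List.pyGetD v cur 0) n
      let path' := path ++ [cur]
      if (path'.length : Int) = n + 1 then (decide (nxt ≠ cur), path')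
      else pvB_walk v n fwd fuel nxt path'
    else (false, path)

-- `for i in range(n): ...`; after a failed walk, `for j in path: vals[j] = 0`
def pvB_loop (n : Int) : List Int → List Int → Bool
  | [], _ => false
  | i :: rest, v =>
    if PySem.List.pyGetD v i 0 = 0 then pvB_loop n rest v
    else
      if (pvB_walk v n (decide (0 < PySem.List.pyGetD v i 0)) (v.length + 1) i []).1 then true
      else pvB_loop n rest
        ((pvB_walk v n (decide (0 < PySem.List.pyGetD v i 0)) (v.length + 1) i []).2.foldl
          (fun w j => w.set j.toNat 0) v)

def circular_array_loop_v2_alt (nums : List Int) : Bool :=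
  pvB_loop (nums.length : Int) (PySem.List.pyRange 0 (nums.length : Int) 1) nums

-- ===== PRECONDITION & SPEC =====
def Spec_circular_array_loop_v2 (nums : List Int) (out : Bool) : Prop := out = circular_array_loop_v2_alt nums
instance (nums : List Int) (out : Bool) : Decidable (Spec_circular_array_loop_v2 nums out) := by unfold Spec_circular_array_loop_v2; infer_instance

-- ===== CLAIM (what is proved, stated in full; the proofs are below) =====
def Claim_equal_circular_array_loop_v2 : Prop := ∀ (nums : List Int), Dom_circular_array_loop_v2 nums → Spec_circular_array_loop_v2 nums (circular_array_loop_v2 nums)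

-- ===== LEMMAS AND PROOFS =====

-- The deterministic successor function on indices, as a Nat → Nat map.
def pvStep (v : List Int) (j : Nat) : Nat := (((j : Int) + v.getD j 0) % (v.length : Int)).toNat
-- iterates of the walk starting at i
def pvIt (v : List Int) (i t : Nat) : Nat := (pvStep v)^[t] i
-- "cell j is nonzero with the direction fwd"
def pvGoodB (v : List Int) (fwd : Bool) (j : Nat) : Bool :=
  (v.getD j 0 != 0) && (decide (0 < v.getD j 0) == fwd)
-- the array with the first t walk cells zeroed
def pvZed (v : List Int) (i t : Nat) : List Int :=
  (List.range t).foldl (fun w m => w.set (pvIt v i m) 0) v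
-- the whole walk stays consistent with fwd
def pvAG (v : List Int) (fwd : Bool) (i : Nat) : Prop :=
  ∀ k, pvGoodB v fwd (pvIt v i k) = true
-- walk position m is bad or a revisit (A's invalidation loop stops at the first such m)
def pvP (v : List Int) (fwd : Bool) (i : Nat) (m : Nat) : Prop :=
  pvGoodB v fwd (pvIt v i m) = false ∨ ∃ j < m, pvIt v i j = pvIt v i m

lemma pvStep_lt (v : List Int) (hN : 0 < v.length) (j : Nat) : pvStep v j < v.length := by
  unfold pvStep
  have h1 : (0:Int) < (v.length : Int) := by exact_mod_cast hN
  have hne : (v.length : Int) ≠ 0 := by omega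
  have h2 := Int.emod_nonneg ((j : Int) + v.getD j 0) hne
  have h3 := Int.emod_lt_of_pos ((j : Int) + v.getD j 0) h1
  omega

lemma pvIt_lt (v : List Int) (i : Nat) (hN : 0 < v.length) (hi : i < v.length) (t : Nat) :
    pvIt v i t < v.length := by
  induction t with
  | zero => exact hi
  | succ t ih =>
    have h : pvIt v i (t+1) = pvStep v (pvIt v i t) := Function.iterate_succ_apply' _ _ _
    rw [h]; exact pvStep_lt v hN _

lemma pvIt_succ (v : List Int) (i t : Nat) : pvIt v i (t+1) = pvStep v (pvIt v i t) :=
  Function.iterate_succ_apply' _ _ _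

lemma pvIt_add (v : List Int) (i m t : Nat) : pvIt v i (m + t) = (pvStep v)^[m] (pvIt v i t) :=
  Function.iterate_add_apply _ _ _ _

-- the raw Int expression both ports use for the next index, as a Nat step
lemma pvStep_cast (v : List Int) (hN : 0 < v.length) (j : Nat) :
    PySem.Int.mod ((j:Int) + PySem.List.pyGetD v (j:Int) 0) (v.length : Int) = ((pvStep v j : Nat) : Int) := by
  have h1 : (0:Int) < (v.length : Int) := by exact_mod_cast hN
  have hne : (v.length : Int) ≠ 0 := by omega
  have h0 : ((j:Int) + v.getD j 0) % (v.length : Int) = ((((j:Int) + v.getD j 0) % (v.length : Int)).toNat : Int) :=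
    (Int.toNat_of_nonneg (Int.emod_nonneg _ hne)).symm
  rw [PySem.List.pyGetD_natCast, PySem.Int.mod_eq_emod_of_pos h1]
  exact h0

lemma pvA_next_cast (v : List Int) (hN : 0 < v.length) (j : Nat) :
    pvA_next v (v.length : Int) (j:Int) = ((pvStep v j : Nat) : Int) := by
  unfold pvA_next; exact pvStep_cast v hN j

-- A's break-condition at a cell, in terms of pvGoodB
lemma condA_iff (v : List Int) (fwd : Bool) (j : Nat) :
    (PySem.List.pyGetD v (j:Int) 0 = 0 ∨ decide (0 < PySem.List.pyGetD v (j:Int) 0) ≠ fwd)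
      ↔ pvGoodB v fwd j = false := by
  rw [PySem.List.pyGetD_natCast]
  unfold pvGoodB
  cases h : decide (0 < v.getD j 0) <;> cases fwd <;> simp_all

-- B's continue-condition at a cell, in terms of pvGoodB
lemma condB_iff (v : List Int) (fwd : Bool) (j : Nat) :
    (PySem.List.pyGetD v (j:Int) 0 ≠ 0 ∧ decide (0 < PySem.List.pyGetD v (j:Int) 0) = fwd)
      ↔ pvGoodB v fwd j = true := by
  rw [PySem.List.pyGetD_natCast]
  unfold pvGoodB
  cases h : decide (0 < v.getD j 0) <;> cases fwd <;> simp_all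

lemma not_condA (v : List Int) (fwd : Bool) (j : Nat) (h : pvGoodB v fwd j = true) :
    ¬(PySem.List.pyGetD v (j:Int) 0 = 0 ∨ decide (0 < PySem.List.pyGetD v (j:Int) 0) ≠ fwd) := by
  rw [condA_iff]; simp [h]

lemma condA_of (v : List Int) (fwd : Bool) (j : Nat) (h : pvGoodB v fwd j = false) :
    (PySem.List.pyGetD v (j:Int) 0 = 0 ∨ decide (0 < PySem.List.pyGetD v (j:Int) 0) ≠ fwd) :=
  (condA_iff v fwd j).mpr h

lemma condB_of (v : List Int) (fwd : Bool) (j : Nat) (h : pvGoodB v fwd j = true) :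
    (PySem.List.pyGetD v (j:Int) 0 ≠ 0 ∧ decide (0 < PySem.List.pyGetD v (j:Int) 0) = fwd) :=
  (condB_iff v fwd j).mpr h

lemma not_condB (v : List Int) (fwd : Bool) (j : Nat) (h : pvGoodB v fwd j = false) :
    ¬(PySem.List.pyGetD v (j:Int) 0 ≠ 0 ∧ decide (0 < PySem.List.pyGetD v (j:Int) 0) = fwd) := by
  rw [condB_iff]; simp [h]

lemma per1 (v : List Int) (i a b : Nat) (hab : a ≤ b) (h : pvIt v i a = pvIt v i b) :
    ∀ k, a ≤ k → pvIt v i (k + (b - a)) = pvIt v i k := by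
  intro k hk
  obtain ⟨d, rfl⟩ : ∃ d, k = a + d := ⟨k - a, by omega⟩
  have e1 : a + d + (b - a) = d + b := by omega
  have e2 : a + d = d + a := by omega
  rw [e1, e2, pvIt_add, pvIt_add, h]

lemma perM (v : List Int) (i a b : Nat) (hab : a ≤ b) (h : pvIt v i a = pvIt v i b) :
    ∀ m k, a ≤ k → pvIt v i (k + m * (b - a)) = pvIt v i k := by
  intro m
  induction m with
  | zero => intro k _; simp
  | succ m ih =>
    intro k hk
    have e : k + (m + 1) * (b - a) = (k + m * (b - a)) + (b - a) := by ring
    rw [e, per1 v i a b hab h _ (by omega), ih k hk]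

lemma allGood_of_repeat (v : List Int) (fwd : Bool) (i a b : Nat) (hab : a < b)
    (h : pvIt v i a = pvIt v i b)
    (hg : ∀ m, m < b → pvGoodB v fwd (pvIt v i m) = true) : pvAG v fwd i := by
  intro k
  induction k using Nat.strong_induction_on with
  | _ k ih =>
    by_cases hk : k < b
    · exact hg k hk
    · have h1 : a ≤ k - (b - a) := by omega
      have h2 : (k - (b - a)) + (b - a) = k := by omega
      have h3 := per1 v i a b (le_of_lt hab) h (k - (b - a)) h1
      rw [h2] at h3
      rw [h3]
      exact ih _ (by omega)

lemma const_from (v : List Int) (i s : Nat) (h : pvIt v i (s+1) = pvIt v i s) :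
    ∀ m, s ≤ m → pvIt v i m = pvIt v i s := by
  intro m hm
  induction m, hm using Nat.le_induction with
  | base => rfl
  | succ m hm ih => rw [pvIt_succ, ih, ← pvIt_succ, h]

lemma exists_repeat (v : List Int) (i : Nat) (hN : 0 < v.length) (hi : i < v.length) :
    ∃ a b, a < b ∧ b ≤ v.length ∧ pvIt v i a = pvIt v i b := by
  have hcard : Fintype.card (Fin v.length) < Fintype.card (Fin (v.length + 1)) := by simp
  obtain ⟨a, b, hne, heq⟩ :=
    Fintype.exists_ne_map_eq_of_card_lt
      (fun k : Fin (v.length + 1) => (⟨pvIt v i k, pvIt_lt v i hN hi k⟩ : Fin v.length)) hcard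
  have hval : pvIt v i a = pvIt v i b := congrArg Fin.val heq
  rcases lt_or_gt_of_ne (fun h => hne (Fin.ext h)) with h | h
  · exact ⟨a, b, h, by omega, hval⟩
  · exact ⟨b, a, h, by omega, hval.symm⟩

lemma exists_meet (v : List Int) (i : Nat) (hN : 0 < v.length) (hi : i < v.length) :
    ∃ s, 1 ≤ s ∧ s ≤ v.length ∧ pvIt v i s = pvIt v i (2*s) := by
  obtain ⟨a, b, hab, hbN, heq⟩ := exists_repeat v i hN hi
  rcases Nat.eq_zero_or_pos a with rfl | ha
  · refine ⟨b, by omega, hbN, ?_⟩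
    have hper := perM v i 0 b (by omega) heq 1 b (by omega)
    have e : b + 1 * (b - 0) = 2 * b := by omega
    rw [e] at hper
    exact hper.symm
  · have hp1 : 1 ≤ b - a := by omega
    have hdm := Nat.div_add_mod (a + (b - a) - 1) (b - a)
    have hmod : (a + (b - a) - 1) % (b - a) < b - a := Nat.mod_lt _ (by omega)
    set q := (a + (b - a) - 1) / (b - a) with hq
    set s := (b - a) * q with hs
    have hsub : s + (a + (b - a) - 1) % (b - a) = a + (b - a) - 1 := by
      rw [hs, hq]; exact hdm
    have has : a ≤ s := by omega
    have hsb : s ≤ b - 1 := by omega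
    refine ⟨s, by omega, by omega, ?_⟩
    have hper := perM v i a b (by omega) heq q s has
    have e : s + q * (b - a) = 2 * s := by rw [hs]; ring
    rw [e] at hper
    exact hper.symm

lemma selfloop_iff (v : List Int) (i s : Nat) (h1 : 1 ≤ s) (hsN : s ≤ v.length)
    (hm : pvIt v i s = pvIt v i (2*s)) :
    (pvIt v i (s+1) = pvIt v i s ↔ pvIt v i (v.length+1) = pvIt v i v.length) := by
  constructor
  · intro h
    have hc := const_from v i s h
    rw [hc (v.length+1) (by omega), hc v.length (by omega)]
  · intro h
    have hc := const_from v i v.length h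
    have hper := perM v i s (2*s) (by omega) hm v.length s (le_refl s)
    have e : 2*s - s = s := by omega
    rw [e] at hper
    have hge : v.length ≤ s + v.length * s := by nlinarith
    have h2 := hc (s + v.length * s) hge
    have hsN' : pvIt v i s = pvIt v i v.length := by rw [← hper, h2]
    have h3 : pvIt v i (s+1) = pvIt v i (v.length+1) := by
      rw [pvIt_succ, pvIt_succ, hsN']
    rw [h3, h, ← hsN']

lemma floyd_good (v : List Int) (fwd : Bool) (i : Nat) (hN : 0 < v.length)
    (hAG : pvAG v fwd i) (s : Nat) (h1 : 1 ≤ s) (hsN : s ≤ v.length)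
    (hm : pvIt v i s = pvIt v i (2*s)) :
    ∀ fuel t, t < s → s ≤ t + fuel →
      pvA_floyd v (v.length:Int) fwd fuel ((pvIt v i t : Nat) : Int) ((pvIt v i (2*t) : Nat) : Int)
        = decide (pvIt v i (v.length+1) ≠ pvIt v i v.length) := by
  intro fuel
  induction fuel with
  | zero => intro t ht hf; omega
  | succ fuel ih =>
    intro t ht hf
    rw [pvA_floyd]
    simp only [pvA_next_cast v hN, ← pvIt_succ]
    rw [if_neg (not_condA v fwd _ (hAG (t+1)))]
    rw [if_neg (not_condA v fwd _ (hAG (2*t+1)))]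
    rw [if_neg (not_condA v fwd _ (hAG (2*t+1+1)))]
    by_cases hmeet : pvIt v i (t+1) = pvIt v i (2*t+1+1)
    · rw [if_pos (by exact_mod_cast hmeet)]
      have hm' : pvIt v i (t+1) = pvIt v i (2*(t+1)) := by
        have e : 2*(t+1) = 2*t+1+1 := by ring
        rw [e]; exact hmeet
      have hiff := selfloop_iff v i (t+1) (by omega) (by omega) hm'
      by_cases hsl : pvIt v i (t+1+1) = pvIt v i (t+1)
      · rw [if_neg (by exact_mod_cast not_not_intro hsl)]
        simp [hiff.mp hsl]
      · rw [if_pos (by exact_mod_cast hsl)]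
        have hne : pvIt v i (v.length+1) ≠ pvIt v i v.length := fun h => hsl (hiff.mpr h)
        simp [hne]
    · rw [if_neg (by exact_mod_cast hmeet)]
      have hts : t + 1 < s := by
        rcases Nat.lt_or_ge (t+1) s with h | h
        · exact h
        · have he : t + 1 = s := by omega
          subst he
          exfalso
          exact hmeet (by
            have e2 : 2*t+1+1 = 2*(t+1) := by ring
            rw [e2]; exact hm)
      have e : 2*t+1+1 = 2*(t+1) := by ring
      rw [e]
      exact ih (t+1) hts (by omega)

lemma floyd_bad (v : List Int) (fwd : Bool) (i : Nat) (hN : 0 < v.length)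
    (hbad : ¬ pvAG v fwd i) :
    ∀ fuel t, (∀ m, m ≤ 2*t → pvGoodB v fwd (pvIt v i m) = true) →
      pvA_floyd v (v.length:Int) fwd fuel ((pvIt v i t : Nat) : Int) ((pvIt v i (2*t) : Nat) : Int)
        = false := by
  intro fuel
  induction fuel with
  | zero => intro t _; rw [pvA_floyd]
  | succ fuel ih =>
    intro t hg
    rw [pvA_floyd]
    simp only [pvA_next_cast v hN, ← pvIt_succ]
    by_cases c1 : pvGoodB v fwd (pvIt v i (t+1)) = true
    case neg =>
      rw [Bool.not_eq_true] at c1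
      rw [if_pos (condA_of v fwd _ c1)]
    case pos =>
    rw [if_neg (not_condA v fwd _ c1)]
    by_cases c2 : pvGoodB v fwd (pvIt v i (2*t+1)) = true
    case neg =>
      rw [Bool.not_eq_true] at c2
      rw [if_pos (condA_of v fwd _ c2)]
    case pos =>
    rw [if_neg (not_condA v fwd _ c2)]
    by_cases c3 : pvGoodB v fwd (pvIt v i (2*t+1+1)) = true
    case neg =>
      rw [Bool.not_eq_true] at c3
      rw [if_pos (condA_of v fwd _ c3)]
    case pos =>
    rw [if_neg (not_condA v fwd _ c3)]
    by_cases hmeet : pvIt v i (t+1) = pvIt v i (2*t+1+1)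
    · exfalso
      apply hbad
      refine allGood_of_repeat v fwd i (t+1) (2*t+1+1) (by omega) hmeet ?_
      intro m hmlt
      rcases Nat.lt_or_ge m (2*t+1) with h | h
      · exact hg m (by omega)
      · have he : m = 2*t+1 := by omega
        subst he; exact c2
    · rw [if_neg (by exact_mod_cast hmeet)]
      have e : 2*t+1+1 = 2*(t+1) := by ring
      rw [e]
      apply ih (t+1)
      intro m hm
      rcases Nat.lt_or_ge m (2*t+1) with h | h
      · exact hg m (by omega)
      · rcases Nat.eq_or_lt_of_le h with h' | h'
        · rw [← h']; exact c2
        · have he : m = 2*t+2 := by omega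
          subst he
          have e2 : 2*t+2 = 2*t+1+1 := by ring
          rw [e2]; exact c3

-- B's walk when the whole walk is consistent: runs the full n+1 steps
lemma walk_good (v : List Int) (fwd : Bool) (i : Nat) (hN : 0 < v.length)
    (hAG : pvAG v fwd i) :
    ∀ d t, t + d = v.length →
      pvB_walk v (v.length:Int) fwd (v.length + 1 - t) ((pvIt v i t : Nat) : Int)
          ((List.range t).map (fun m => ((pvIt v i m : Nat) : Int)))
        = (decide (pvIt v i (v.length+1) ≠ pvIt v i v.length),
            (List.range (v.length+1)).map (fun m => ((pvIt v i m : Nat) : Int))) := by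
  intro d
  induction d with
  | zero =>
    intro t ht
    have htN : t = v.length := by omega
    subst htN
    have e : v.length + 1 - v.length = 0 + 1 := by omega
    rw [e, pvB_walk]
    rw [if_pos (condB_of v fwd _ (hAG v.length))]
    simp only [pvStep_cast v hN, ← pvIt_succ]
    rw [if_pos (by simp)]
    refine congrArg₂ Prod.mk ?_ ?_
    · rw [decide_eq_decide]
      exact_mod_cast Iff.rfl
    · rw [List.range_succ, List.map_append]
      rfl
  | succ d ih =>
    intro t ht
    have e : v.length + 1 - t = (v.length + 1 - (t+1)) + 1 := by omega
    rw [e, pvB_walk]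
    rw [if_pos (condB_of v fwd _ (hAG t))]
    simp only [pvStep_cast v hN, ← pvIt_succ]
    rw [if_neg (by simp [List.length_append]; omega)]
    have epath : (List.range t).map (fun m => ((pvIt v i m : Nat) : Int)) ++ [((pvIt v i t : Nat) : Int)]
        = (List.range (t+1)).map (fun m => ((pvIt v i m : Nat) : Int)) := by
      rw [List.range_succ, List.map_append]; rfl
    rw [epath]
    exact ih (t+1) (by omega)

-- B's walk when some walk cell is inconsistent: stops at the first bad step k
lemma walk_bad (v : List Int) (fwd : Bool) (i : Nat) (hN : 0 < v.length)
    (k : Nat) (hkN : k ≤ v.length)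
    (hbadk : pvGoodB v fwd (pvIt v i k) = false)
    (hgoodlt : ∀ m, m < k → pvGoodB v fwd (pvIt v i m) = true) :
    ∀ d t, t + d = k →
      pvB_walk v (v.length:Int) fwd (v.length + 1 - t) ((pvIt v i t : Nat) : Int)
          ((List.range t).map (fun m => ((pvIt v i m : Nat) : Int)))
        = (false, (List.range k).map (fun m => ((pvIt v i m : Nat) : Int))) := by
  intro d
  induction d with
  | zero =>
    intro t ht
    have htk : t = k := by omega
    subst htk
    have e : v.length + 1 - t = (v.length - t) + 1 := by omega
    rw [e, pvB_walk]
    rw [if_neg (not_condB v fwd _ hbadk)]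
  | succ d ih =>
    intro t ht
    have e : v.length + 1 - t = (v.length + 1 - (t+1)) + 1 := by omega
    rw [e, pvB_walk]
    rw [if_pos (condB_of v fwd _ (hgoodlt t (by omega)))]
    simp only [pvStep_cast v hN, ← pvIt_succ]
    rw [if_neg (by simp [List.length_append]; omega)]
    have epath : (List.range t).map (fun m => ((pvIt v i m : Nat) : Int)) ++ [((pvIt v i t : Nat) : Int)]
        = (List.range (t+1)).map (fun m => ((pvIt v i m : Nat) : Int)) := by
      rw [List.range_succ, List.map_append]; rfl
    rw [epath]
    exact ih (t+1) (by omega)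

-- zed lemmas
lemma pvZed_succ (v : List Int) (i t : Nat) :
    pvZed v i (t+1) = (pvZed v i t).set (pvIt v i t) 0 := by
  unfold pvZed
  rw [List.range_succ, List.foldl_append]
  rfl

lemma pvZed_length (v : List Int) (i t : Nat) : (pvZed v i t).length = v.length := by
  induction t with
  | zero => rfl
  | succ t ih => rw [pvZed_succ, List.length_set, ih]

lemma pvZed_getD (v : List Int) (i t : Nat) (hN : 0 < v.length) (hi : i < v.length) (u : Nat) :
    (pvZed v i t).getD u 0 = if (∃ m, m < t ∧ pvIt v i m = u) then 0 else v.getD u 0 := by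
  induction t with
  | zero => simp [pvZed]
  | succ t ih =>
    rw [pvZed_succ]
    by_cases hu : pvIt v i t = u
    · subst hu
      rw [if_pos ⟨t, by omega, rfl⟩]
      have hlt : pvIt v i t < (pvZed v i t).length := by
        rw [pvZed_length]; exact pvIt_lt v i hN hi t
      rw [List.getD_eq_getElem?_getD, List.getElem?_set_self (by omega)]
      rfl
    · have hset : ((pvZed v i t).set (pvIt v i t) 0).getD u 0 = (pvZed v i t).getD u 0 := by
        rw [List.getD_eq_getElem?_getD, List.getD_eq_getElem?_getD, List.getElem?_set_ne hu]
      rw [hset, ih]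
      refine if_congr ?_ rfl rfl
      constructor
      · rintro ⟨m, hm, he⟩; exact ⟨m, by omega, he⟩
      · rintro ⟨m, hm, he⟩
        refine ⟨m, ?_, he⟩
        rcases Nat.lt_or_ge m t with h | h
        · exact h
        · exfalso
          have he2 : m = t := by omega
          subst he2; exact hu he

lemma pvZed_eq_of_cover (v : List Int) (i t1 t2 : Nat) (hN : 0 < v.length) (hi : i < v.length)
    (hcov : ∀ u, (∃ m, m < t1 ∧ pvIt v i m = u) ↔ (∃ m, m < t2 ∧ pvIt v i m = u)) :
    pvZed v i t1 = pvZed v i t2 := by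
  apply List.ext_getElem
  · rw [pvZed_length, pvZed_length]
  · intro u h1 h2
    have e1 : (pvZed v i t1)[u] = (pvZed v i t1).getD u 0 := (List.getD_eq_getElem _ _ h1).symm
    have e2 : (pvZed v i t2)[u] = (pvZed v i t2).getD u 0 := (List.getD_eq_getElem _ _ h2).symm
    rw [e1, e2, pvZed_getD v i t1 hN hi, pvZed_getD v i t2 hN hi]
    exact if_congr (hcov u) rfl rfl

-- number of pairwise-distinct walk positions is at most n
lemma distinct_le (v : List Int) (i : Nat) (hN : 0 < v.length) (hi : i < v.length) (k : Nat)
    (hdist : ∀ j m, j < m → m < k → pvIt v i j ≠ pvIt v i m) : k ≤ v.length := by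
  classical
  have hinj : Set.InjOn (pvIt v i) (Finset.range k) := by
    intro a ha b hb hab
    simp only [Finset.coe_range, Set.mem_Iio] at ha hb
    by_contra hne
    rcases Nat.lt_or_ge a b with h | h
    · exact hdist a b h hb hab
    · exact hdist b a (by omega) ha hab.symm
  have hcard := Finset.card_le_card_of_injOn (t := Finset.range v.length) (pvIt v i)
    (fun a _ => Finset.mem_range.mpr (pvIt_lt v i hN hi a)) hinj
  rw [Finset.card_range, Finset.card_range] at hcard
  exact hcard

-- A's invalidation loop computes pvZed v i K for K the first bad-or-revisit position
lemma zeroA_char (v : List Int) (fwd : Bool) (i : Nat) (hN : 0 < v.length) (hi : i < v.length)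
    (K : Nat) (hPK : pvP v fwd i K) (hnotP : ∀ m, m < K → ¬ pvP v fwd i m) :
    ∀ fuel t, t ≤ K → K < t + fuel →
      pvA_zero (v.length:Int) fwd fuel (pvZed v i t) ((pvIt v i t : Nat) : Int) = pvZed v i K := by
  intro fuel
  induction fuel with
  | zero => intro t h1 h2; omega
  | succ fuel ih =>
    intro t h1 h2
    rw [pvA_zero]
    rcases Nat.lt_or_ge t K with htK | htK
    · have hnp := hnotP t htK
      unfold pvP at hnp
      push_neg at hnp
      obtain ⟨hgood, hnorep⟩ := hnp
      have hgood' : pvGoodB v fwd (pvIt v i t) = true := by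
        cases h : pvGoodB v fwd (pvIt v i t)
        · exact absurd h hgood
        · rfl
      have hget : PySem.List.pyGetD (pvZed v i t) ((pvIt v i t : Nat) : Int) 0 = v.getD (pvIt v i t) 0 := by
        rw [PySem.List.pyGetD_natCast, pvZed_getD v i t hN hi]
        rw [if_neg]
        rintro ⟨m, hm, he⟩
        exact hnorep m hm he
      rw [if_pos (by
        rw [hget, ← PySem.List.pyGetD_natCast v (pvIt v i t) 0]
        exact condB_of v fwd _ hgood')]
      have hnext : pvA_next (pvZed v i t) (v.length:Int) ((pvIt v i t : Nat) : Int)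
          = ((pvIt v i (t+1) : Nat) : Int) := by
        unfold pvA_next
        rw [hget, ← PySem.List.pyGetD_natCast v (pvIt v i t) 0, pvStep_cast v hN, pvIt_succ]
      have hset : (pvZed v i t).set (((pvIt v i t : Nat) : Int)).toNat 0 = pvZed v i (t+1) := by
        rw [pvZed_succ]; congr 1
      rw [hnext, hset]
      exact ih (t+1) (by omega) (by omega)
    · have hte : t = K := by omega
      subst hte
      rw [if_neg ?hc]
      case hc =>
        rintro ⟨hz, hsign⟩
        rw [PySem.List.pyGetD_natCast, pvZed_getD v i t hN hi] at hz hsign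
        by_cases hrep : ∃ m, m < t ∧ pvIt v i m = pvIt v i t
        · rw [if_pos hrep] at hz; exact hz rfl
        · rw [if_neg hrep] at hz hsign
          rcases hPK with hbad | hr
          · unfold pvGoodB at hbad
            rw [Bool.and_eq_false_iff] at hbad
            rcases hbad with h | h
            · simp only [bne_eq_false_iff_eq] at h
              exact hz h
            · rw [beq_eq_false_iff_ne] at h
              exact h hsign
          · exact hrep hr

-- every walk position is covered by the first K positions once position K is a revisit
lemma cover_of_revisit (v : List Int) (i K j0 : Nat) (hj0 : j0 < K)
    (he : pvIt v i j0 = pvIt v i K) :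
    ∀ m, ∃ j, j < K ∧ pvIt v i j = pvIt v i m := by
  intro m
  induction m using Nat.strong_induction_on with
  | _ m ihm =>
    rcases Nat.lt_or_ge m K with h | h
    · exact ⟨m, h, rfl⟩
    · have h1 : j0 ≤ m - (K - j0) := by omega
      have h2 : (m - (K - j0)) + (K - j0) = m := by omega
      have h3 := per1 v i j0 K (by omega) he (m - (K - j0)) h1
      rw [h2] at h3
      obtain ⟨j, hj, he'⟩ := ihm (m - (K - j0)) (by omega)
      exact ⟨j, hj, by rw [he', h3]⟩

-- bridge from B's foldl over the recorded path to pvZed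
lemma foldB_eq_zed (v : List Int) (i t : Nat) :
    ((List.range t).map (fun m => ((pvIt v i m : Nat) : Int))).foldl
        (fun w j => w.set j.toNat 0) v = pvZed v i t := by
  rw [List.foldl_map]
  unfold pvZed
  congr 1

-- B's invalidation fold preserves the length
lemma foldSet_length (path : List Int) : ∀ (v : List Int),
    (path.foldl (fun w j => w.set j.toNat 0) v).length = v.length := by
  induction path with
  | nil => intro v; rfl
  | cons p rest ih =>
    intro v
    simp only [List.foldl_cons]
    rw [ih, List.length_set]

-- the main per-start lemma: Floyd agrees with the bounded walk, and the two
-- invalidation steps produce the same array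
lemma inner_main (v : List Int) (j : Nat) (hN : 0 < v.length) (hj : j < v.length)
    (hnz : v.getD j 0 ≠ 0) :
    (pvA_floyd v (v.length:Int) (decide (0 < v.getD j 0)) (v.length + 1) ((j:Nat):Int) ((j:Nat):Int)
       = (pvB_walk v (v.length:Int) (decide (0 < v.getD j 0)) (v.length + 1) ((j:Nat):Int) []).1)
    ∧ (pvA_zero (v.length:Int) (decide (0 < v.getD j 0)) (v.length + 1) v ((j:Nat):Int)
       = (pvB_walk v (v.length:Int) (decide (0 < v.getD j 0)) (v.length + 1) ((j:Nat):Int) []).2.foldl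
           (fun w jj => w.set jj.toNat 0) v) := by
  classical
  set fwd := decide (0 < v.getD j 0) with hfwd
  have hx0 : pvIt v j 0 = j := rfl
  have hgood0 : pvGoodB v fwd j = true := by
    have h1 : (v.getD j 0 != 0) = true := by simpa using hnz
    unfold pvGoodB
    rw [h1, hfwd]
    simp
  have hPne : {m | pvP v fwd j m}.Nonempty := by
    obtain ⟨a, b, hab, _, he⟩ := exists_repeat v j hN hj
    exact ⟨b, Or.inr ⟨a, hab, he⟩⟩
  set K := sInf {m | pvP v fwd j m} with hK
  have hPK : pvP v fwd j K := Nat.sInf_mem hPne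
  have hnotP : ∀ m, m < K → ¬ pvP v fwd j m := by
    intro m hm hmem
    have := Nat.sInf_le (show m ∈ {m | pvP v fwd j m} from hmem)
    omega
  have hKN : K ≤ v.length := by
    apply distinct_le v j hN hj
    intro a b hab hbK he
    exact hnotP b hbK (Or.inr ⟨a, hab, he⟩)
  have hzeroA : pvA_zero (v.length:Int) fwd (v.length + 1) v ((j:Nat):Int) = pvZed v j K := by
    have hz := zeroA_char v fwd j hN hj K hPK hnotP (v.length + 1) 0 (by omega) (by omega)
    have e0 : pvZed v j 0 = v := by simp [pvZed]
    rw [e0] at hz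
    exact hz
  by_cases hAG : pvAG v fwd j
  · obtain ⟨s, hs1, hsN, hsm⟩ := exists_meet v j hN hj
    have hfl := floyd_good v fwd j hN hAG s hs1 hsN hsm (v.length+1) 0 (by omega) (by omega)
    have hwk := walk_good v fwd j hN hAG v.length 0 (by omega)
    simp only [Nat.sub_zero, List.range_zero, List.map_nil] at hwk
    simp only [Nat.mul_zero, hx0] at hfl hwk
    constructor
    · rw [hfl, hwk]
    · rw [hzeroA, hwk]
      simp only
      rw [foldB_eq_zed]
      have hrev : ∃ j0, j0 < K ∧ pvIt v j j0 = pvIt v j K := by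
        rcases hPK with hbad | h
        · exact absurd (hAG K) (by simp [hbad])
        · exact h
      obtain ⟨j0, hj0, he⟩ := hrev
      apply pvZed_eq_of_cover v j K (v.length+1) hN hj
      intro u
      constructor
      · rintro ⟨m, hm, hmu⟩; exact ⟨m, by omega, hmu⟩
      · rintro ⟨m, _, hmu⟩
        obtain ⟨j', hj', he'⟩ := cover_of_revisit v j K j0 hj0 he m
        exact ⟨j', hj', by rw [he', hmu]⟩
  · have hbne : {m | pvGoodB v fwd (pvIt v j m) = false}.Nonempty := by
      unfold pvAG at hAG
      push_neg at hAG
      obtain ⟨k, hk⟩ := hAG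
      exact ⟨k, by simpa using hk⟩
    set k := sInf {m | pvGoodB v fwd (pvIt v j m) = false} with hkdef
    have hbadk : pvGoodB v fwd (pvIt v j k) = false := Nat.sInf_mem hbne
    have hgoodlt : ∀ m, m < k → pvGoodB v fwd (pvIt v j m) = true := by
      intro m hm
      by_contra hc
      rw [Bool.not_eq_true] at hc
      have := Nat.sInf_le (s := {m | pvGoodB v fwd (pvIt v j m) = false}) hc
      omega
    have hkN : k ≤ v.length := by
      apply distinct_le v j hN hj
      intro a b hab hbk he
      exact hAG (allGood_of_repeat v fwd j a b hab he (fun m hm => hgoodlt m (by omega)))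
    have hfl := floyd_bad v fwd j hN hAG (v.length+1) 0 (by
      intro m hm
      have hm0 : m = 0 := by omega
      subst hm0
      exact hgood0)
    have hwk := walk_bad v fwd j hN k hkN hbadk hgoodlt k 0 (by omega)
    simp only [Nat.sub_zero, List.range_zero, List.map_nil] at hwk
    simp only [Nat.mul_zero, hx0] at hfl hwk
    constructor
    · rw [hfl, hwk]
    · rw [hzeroA, hwk]
      simp only
      rw [foldB_eq_zed]
      have hKk : K = k := by
        apply Nat.le_antisymm
        · exact Nat.sInf_le (Or.inl hbadk)
        · by_contra h
          push_neg at h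
          rcases hPK with hbad | ⟨a, ha, he⟩
          · exact absurd (hgoodlt K h) (by simp [hbad])
          · exact hAG (allGood_of_repeat v fwd j a K ha he (fun m hm => hgoodlt m (by omega)))
      rw [hKk]

lemma outer_eq (n : Int) : ∀ (is : List Int) (v : List Int),
    (v.length : Int) = n → (∀ i' ∈ is, 0 ≤ i' ∧ i' < n) →
    pvA_outer n is v = pvB_loop n is v := by
  intro is
  induction is with
  | nil => intro v _ _; rfl
  | cons i rest ih =>
    intro v hlen his
    obtain ⟨hi0, hin⟩ := his i (List.mem_cons_self ..)
    have hN : 0 < v.length := by omega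
    have hji : ((i.toNat : Nat) : Int) = i := Int.toNat_of_nonneg hi0
    have hjlt : i.toNat < v.length := by omega
    rw [pvA_outer, pvB_loop]
    by_cases hz : PySem.List.pyGetD v i 0 = 0
    · rw [if_pos hz, if_pos hz]
      exact ih v hlen (fun i' hi' => his i' (List.mem_cons_of_mem _ hi'))
    · rw [if_neg hz, if_neg hz]
      rw [← hji] at hz ⊢
      rw [PySem.List.pyGetD_natCast] at hz
      simp only [PySem.List.pyGetD_natCast]
      rw [← hlen]
      obtain ⟨h1, h2⟩ := inner_main v i.toNat hN hjlt hz
      rw [h1, h2]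
      by_cases hb : (pvB_walk v (v.length:Int) (decide (0 < v.getD i.toNat 0)) (v.length+1) ((i.toNat : Nat):Int) []).1
      · rw [if_pos hb, if_pos hb]
      · rw [Bool.not_eq_true] at hb
        rw [hb, if_neg (by simp), if_neg (by simp)]
        rw [hlen]
        apply ih
        · rw [foldSet_length]
          exact hlen
        · exact fun i' hi' => his i' (List.mem_cons_of_mem _ hi')

-- ===== VERDICT (by name: the statement is the Claim_ definition above) =====
theorem circular_array_loop_v2_spec : Claim_equal_circular_array_loop_v2 := by
  intro nums _
  unfold Spec_circular_array_loop_v2 circular_array_loop_v2 circular_array_loop_v2_alt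
  apply outer_eq
  · rfl
  · intro i' hi'
    have h := (PySem.List.mem_pyRange_one).mp hi'
    exact ⟨h.1, h.2⟩
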